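-- pv_equiv track=rewrite | github.com/rithigababuraj/csa0827-python-programming | day 5 q8.py | count_deviation
-- ===== SOURCE A (Python) =====
-- def count_deviation(board):
--     n = len(board)
--     deviation_rows = deviation_cols = 0
--     for i in range(n):
--         row = board[i]
--         col = [board[j][i] for j in range(n)]
--         if row.count(0) != n // 2 or row.count(1) != n // 2:
--             deviation_rows += 1
--         if col.count(0) != n // 2 or col.count(1) != n // 2:
--             deviation_cols += 1
--     return deviation_rows, deviation_cols
-- ===== SOURCE B (Python) =====
-- def count_deviation(board):
--     n = len(board)
--     h = n // 2
--     dev_rows = 0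
--     col_stats = [(0, 0)] * n
--     for row in board:
--         zeros = ones = 0
--         for v in row:
--             if v == 0:
--                 zeros += 1
--             elif v == 1:
--                 ones += 1
--         if zeros != h or ones != h:
--             dev_rows += 1
--         col_stats = [(cz + (row[j] == 0), co + (row[j] == 1))
--                      for j, (cz, co) in enumerate(col_stats)]
--     dev_cols = sum(1 for cz, co in col_stats if cz != h or co != h)
--     return dev_rows, dev_cols
-- ===== Notes on version B (the rewrite author's own statement) =====
-- stated objective: alternative
-- what changed: A rebuilds each column list and runs four .count scans per index; B makes a single sweep over the rows maintaining per-row 0/1 counters and a per-column counter list updated by zip, then tallies deviations once.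
import Mathlib
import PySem

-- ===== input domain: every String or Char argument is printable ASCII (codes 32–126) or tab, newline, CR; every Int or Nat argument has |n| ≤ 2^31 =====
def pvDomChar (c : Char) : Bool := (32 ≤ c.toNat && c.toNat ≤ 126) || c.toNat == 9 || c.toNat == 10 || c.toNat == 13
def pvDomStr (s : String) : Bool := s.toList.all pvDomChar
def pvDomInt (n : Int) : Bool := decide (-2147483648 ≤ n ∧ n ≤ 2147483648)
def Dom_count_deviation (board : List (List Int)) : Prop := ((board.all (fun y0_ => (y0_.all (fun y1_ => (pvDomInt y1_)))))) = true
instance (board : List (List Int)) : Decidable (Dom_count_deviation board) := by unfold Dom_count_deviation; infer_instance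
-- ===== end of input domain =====

-- B replaces A's per-index passes (rebuilding each column and four .count scans) by a single
-- sweep over the rows that maintains per-row and per-column 0/1 counters (objective: alternative).

-- ===== PORT A =====
-- body written as a pair of per-component updates: 'row' feeds only deviation_rows, 'col' only deviation_cols
def count_deviation (board : List (List Int)) : Int × Int :=
  (PySem.List.pyRange 0 (board.length : Int) 1).foldl
    (fun acc i =>
      ((let row := PySem.List.pyGetD board i []    -- board[i]; Pre_ keeps i in range
        if (row.count 0 : Int) ≠ PySem.Int.floordiv (board.length : Int) 2 ∨
           (row.count 1 : Int) ≠ PySem.Int.floordiv (board.length : Int) 2 then acc.1 + 1 else acc.1),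
       (let col := (PySem.List.pyRange 0 (board.length : Int) 1).map
            (fun j => PySem.List.pyGetD (PySem.List.pyGetD board j []) i 0)  -- board[j][i]; Pre_ keeps it in range
        if (col.count 0 : Int) ≠ PySem.Int.floordiv (board.length : Int) 2 ∨
           (col.count 1 : Int) ≠ PySem.Int.floordiv (board.length : Int) 2 then acc.2 + 1 else acc.2)))
    (0, 0)

-- ===== PORT B =====
-- inner 'for v in row' counting loop of Source B
def cdRowStats (row : List Int) : Int × Int :=
  row.foldl (fun p v => if v = 0 then (p.1 + 1, p.2) else if v = 1 then (p.1, p.2 + 1) else p) (0, 0)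

-- the list comprehension over enumerate(col_stats); row[j] out of range raises (Pre_ keeps j in range)
def cdColStep (cs : List (Int × Int)) (row : List Int) : List (Int × Int) :=
  (PySem.List.enumerate cs).map (fun p =>
    (p.2.1 + (if PySem.List.pyGetD row p.1 0 = 0 then 1 else 0),
     p.2.2 + (if PySem.List.pyGetD row p.1 0 = 1 then 1 else 0)))

def cdDevRowStep (h : Int) (dr : Int) (row : List Int) : Int :=
  if (cdRowStats row).1 ≠ h ∨ (cdRowStats row).2 ≠ h then dr + 1 else dr

def count_deviation_alt (board : List (List Int)) : Int × Int :=
  let h : Int := PySem.Int.floordiv (board.length : Int) 2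
  let st := board.foldl (fun st row => (cdDevRowStep h st.1 row, cdColStep st.2 row))
      ((0 : Int), List.replicate board.length ((0 : Int), (0 : Int)))
  (st.1, st.2.foldl (fun acc c => if c.1 ≠ h ∨ c.2 ≠ h then acc + 1 else acc) 0)

-- ===== PRECONDITION & SPEC =====
-- Pre_ excludes ragged boards with a row shorter than len(board): there board[j][i] raises IndexError in A.
def Pre_count_deviation (board : List (List Int)) : Prop :=
  ∀ row ∈ board, board.length ≤ row.length
instance (board : List (List Int)) : Decidable (Pre_count_deviation board) := by
  unfold Pre_count_deviation; infer_instance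
def pvWitness_count_deviation : List (List Int) := [[0, 1], [1, 0]]

def Spec_count_deviation (board : List (List Int)) (out : Int × Int) : Prop := out = count_deviation_alt board
instance (board : List (List Int)) (out : Int × Int) : Decidable (Spec_count_deviation board out) := by unfold Spec_count_deviation; infer_instance

-- ===== CLAIM (what is proved, stated in full; the proofs are below) =====
def Claim_equal_count_deviation : Prop := ∀ (board : List (List Int)), Dom_count_deviation board → Pre_count_deviation board → Spec_count_deviation board (count_deviation board)

-- ===== LEMMAS AND PROOFS =====

-- the column of index i, as both programs see it under Pre_
def cdCol (board : List (List Int)) (i : Nat) : List Int := board.map (fun r => r.getD i 0)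

lemma cdRowStats_go (row : List Int) (p : Int × Int) :
    row.foldl (fun p v => if v = 0 then (p.1 + 1, p.2) else if v = 1 then (p.1, p.2 + 1) else p) p
      = (p.1 + (row.count 0 : Int), p.2 + (row.count 1 : Int)) := by
  induction row generalizing p with
  | nil => simp
  | cons v vs ih =>
    simp only [List.foldl_cons, ih, List.count_cons]
    by_cases h0 : v = 0
    · simp [h0]; ring
    · by_cases h1 : v = 1
      · simp [h1]; push_cast; ring
      · simp [h0, h1]

lemma cdRowStats_eq (row : List Int) :
    cdRowStats row = ((row.count 0 : Int), (row.count 1 : Int)) := by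
  simp [cdRowStats, cdRowStats_go]

lemma cdColFold_getElem? (rs : List (List Int)) (cs : List (Int × Int))
    (hlen : ∀ r ∈ rs, cs.length ≤ r.length) (i : Nat) (hi : i < cs.length) :
    (rs.foldl cdColStep cs)[i]? =
      some (cs[i].1 + ((cdCol rs i).count 0 : Int), cs[i].2 + ((cdCol rs i).count 1 : Int)) := by
  induction rs generalizing cs with
  | nil => simp [cdCol, List.getElem?_eq_getElem hi]
  | cons r rs ih =>
    have hr : cs.length ≤ r.length := hlen r (by simp)
    have hstep : (cdColStep cs r).length = cs.length := by
      simp [cdColStep, PySem.List.length_enumerate]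
    have hlen' : ∀ r' ∈ rs, (cdColStep cs r).length ≤ r'.length := by
      intro r' hr'; rw [hstep]; exact hlen r' (by simp [hr'])
    rw [List.foldl_cons, ih (cdColStep cs r) hlen' (hstep ▸ hi)]
    have hir : i < r.length := lt_of_lt_of_le hi hr
    have hgd : r.getD i 0 = r[i] := List.getD_eq_getElem r 0 hir
    have hcs : (cdColStep cs r)[i] =
        (cs[i].1 + (if r[i] = 0 then 1 else 0), cs[i].2 + (if r[i] = 1 then 1 else 0)) := by
      simp [cdColStep, PySem.List.getElem_enumerate, List.getElem?_eq_getElem hir]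
    rw [hcs]
    simp only [cdCol, List.map_cons, List.count_cons, hgd]
    refine congrArg some (Prod.ext ?_ ?_) <;>
      (simp only [beq_iff_eq]; split_ifs <;> push_cast <;> ring)

lemma cdColFold_eq (board : List (List Int))
    (hpre : ∀ r ∈ board, board.length ≤ r.length) :
    board.foldl cdColStep (List.replicate board.length ((0:Int),(0:Int))) =
      (List.range board.length).map
        (fun i => (((cdCol board i).count 0 : Int), ((cdCol board i).count 1 : Int))) := by
  apply List.ext_getElem?
  intro i
  by_cases hi : i < board.length
  · rw [cdColFold_getElem? board (List.replicate board.length ((0:Int),(0:Int))) (by simpa using hpre) i (by simpa using hi)]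
    simp [hi]
  · have hlen : (board.foldl cdColStep (List.replicate board.length ((0:Int),(0:Int)))).length
        = board.length := by
      have : ∀ (rs : List (List Int)) (cs : List (Int × Int)),
          (∀ r ∈ rs, cs.length ≤ r.length) → (rs.foldl cdColStep cs).length = cs.length := by
        intro rs
        induction rs with
        | nil => intro cs _; rfl
        | cons r rs ih =>
          intro cs h
          have hr : cs.length ≤ r.length := h r (by simp)
          have hstep : (cdColStep cs r).length = cs.length := by
            simp [cdColStep, PySem.List.length_enumerate]
          rw [List.foldl_cons, ih _ (fun r' hr' => hstep ▸ h r' (by simp [hr'])), hstep]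
      simpa using this board (List.replicate board.length ((0:Int),(0:Int))) (by simpa using hpre)
    rw [List.getElem?_eq_none (by omega), List.getElem?_eq_none (by simpa using hi)]

-- A's column list equals cdCol, pointwise in the range
lemma cdColA_eq (board : List (List Int)) (hpre : ∀ r ∈ board, board.length ≤ r.length)
    (k : Nat) (hk : k < board.length) :
    ((List.range board.length).map (fun j : Nat => (j : Int))).map
        (fun j => PySem.List.pyGetD (PySem.List.pyGetD board j []) (k : Int) 0)
      = cdCol board k := by
  rw [← PySem.List.pyRange_zero_nat board.length]
  have h1 : (PySem.List.pyRange 0 (board.length : Int) 1).map (fun j => PySem.List.pyGetD board j [])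
      = board := PySem.List.map_pyGetD_pyRange_zero board []
  have h2 : (PySem.List.pyRange 0 (board.length : Int) 1).map
      (fun j => PySem.List.pyGetD (PySem.List.pyGetD board j []) (k : Int) 0)
      = board.map (fun r => PySem.List.pyGetD r (k : Int) 0) := by
    have h3 := congrArg (List.map (fun r => PySem.List.pyGetD r (k : Int) 0)) h1
    rw [List.map_map] at h3
    exact h3
  rw [h2]
  unfold cdCol
  apply List.map_congr_left
  intro r hr
  have : k < r.length := lt_of_lt_of_le hk (hpre r hr)
  rw [PySem.List.pyGetD_natCast]

-- ===== VERDICT (by name: the statement is the Claim_ definition above) =====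
theorem count_deviation_spec : Claim_equal_count_deviation := by
  intro board _hdom hpre
  unfold Spec_count_deviation
  simp only [count_deviation, count_deviation_alt]
  set h : Int := PySem.Int.floordiv (board.length : Int) 2 with hh
  rw [PySem.List.foldl_prod_mk
      (f := fun dr i => if ((PySem.List.pyGetD board i []).count 0 : Int) ≠ h ∨
          ((PySem.List.pyGetD board i []).count 1 : Int) ≠ h then dr + 1 else dr)
      (g := fun dc i => if (((PySem.List.pyRange 0 (board.length : Int) 1).map
              (fun j => PySem.List.pyGetD (PySem.List.pyGetD board j []) i 0)).count 0 : Int) ≠ h ∨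
          (((PySem.List.pyRange 0 (board.length : Int) 1).map
              (fun j => PySem.List.pyGetD (PySem.List.pyGetD board j []) i 0)).count 1 : Int) ≠ h
          then dc + 1 else dc)]
  rw [PySem.List.foldl_prod_mk (f := cdDevRowStep h) (g := cdColStep)]
  dsimp only
  refine Prod.ext ?_ ?_
  · -- rows
    dsimp only
    rw [PySem.List.foldl_pyRange_zero_pyGetD' board []
        (fun dr row => if ((row.count 0 : Int)) ≠ h ∨ ((row.count 1 : Int)) ≠ h then dr + 1 else dr) 0]
    apply PySem.List.foldl_congr_mem
    intro a r _
    simp [cdDevRowStep, cdRowStats_eq]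
  · -- columns
    dsimp only
    rw [cdColFold_eq board hpre, PySem.List.pyRange_zero_nat board.length,
        List.foldl_map, List.foldl_map]
    apply PySem.List.foldl_congr_mem
    intro acc k hk
    have hk' : k < board.length := List.mem_range.mp hk
    rw [cdColA_eq board hpre k hk']
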